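-- pv_equiv track=rewrite | github.com/hypergraphman/AntonEGE24 | task5/3.py | f
-- ===== SOURCE A (Python) =====
-- def f(n):
--     d1, d2, d3 = map(int, str(n))
--     a = [d1 * 10 + d2, d1 * 10 + d3,
--          d2 * 10 + d1, d2 * 10 + d3,
--          d3 * 10 + d2, d3 * 10 + d1,]
--     nums = []
--     for x in a:
--         if x > 9:
--             nums.append(x)
--     return max(nums) - min(nums)
-- ===== SOURCE B (Python) =====
-- def f(n):
--     d1, d2, d3 = map(int, str(n))
--     a0, a1, a2 = sorted((d1, d2, d3))
--     max_val = 10 * a2 + a1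
--     if a0 > 0:
--         min_val = 10 * a0 + a1
--     elif a1 > 0:
--         min_val = 10 * a1
--     else:
--         min_val = 10 * a2
--     return max_val - min_val
-- ===== Notes on version B (the rewrite author's own statement) =====
-- stated objective: simpler
-- what changed: Instead of building the six two-digit combinations, filtering out those below 10 and taking max minus min, B sorts the three digits once and computes the extremes in closed form (max = 10*largest+second; min by a three-way case split on leading zeros).
import Mathlib
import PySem

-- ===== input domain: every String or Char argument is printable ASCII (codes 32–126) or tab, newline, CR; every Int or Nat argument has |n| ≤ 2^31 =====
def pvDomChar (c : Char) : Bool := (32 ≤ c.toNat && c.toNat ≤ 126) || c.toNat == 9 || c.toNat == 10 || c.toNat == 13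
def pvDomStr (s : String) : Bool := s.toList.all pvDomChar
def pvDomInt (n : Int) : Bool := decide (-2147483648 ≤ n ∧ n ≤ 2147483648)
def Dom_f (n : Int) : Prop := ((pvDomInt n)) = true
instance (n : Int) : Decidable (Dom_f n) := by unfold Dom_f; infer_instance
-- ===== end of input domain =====

-- B changes: closed-form extremes from the sorted digits instead of filtering six combinations (objective: simpler).

-- ===== PORT A =====
-- d1,d2,d3 = map(int, str(n)); the three-way unpack raises unless str(n) has exactly 3 chars
def f (n : Int) : Int :=
  match (PySem.Int.toStr n).toList with
  | [c1, c2, c3] =>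
    let d1 := (PySem.Int.ofStr? (String.mk [c1])).getD 0
    let d2 := (PySem.Int.ofStr? (String.mk [c2])).getD 0
    let d3 := (PySem.Int.ofStr? (String.mk [c3])).getD 0
    let a : List Int := [d1 * 10 + d2, d1 * 10 + d3,
                         d2 * 10 + d1, d2 * 10 + d3,
                         d3 * 10 + d2, d3 * 10 + d1]
    let nums := a.foldl (fun acc x => if x > 9 then acc ++ [x] else acc) []
    (PySem.List.max? nums (fun x => x)).getD 0 - (PySem.List.min? nums (fun x => x)).getD 0
  | _ => 0  -- ValueError / unpack error in Python: excluded by Pre_f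

-- ===== PORT B =====
def f_alt (n : Int) : Int :=
  -- d1, d2, d3 = map(int, str(n))  (the 3-way unpack: anything else raises, excluded by Pre_f)
  let cs := (PySem.Int.toStr n).toList
  if cs.length = 3 then
    let d1 := (PySem.Int.ofStr? (String.mk [cs.getD 0 ' '])).getD 0
    let d2 := (PySem.Int.ofStr? (String.mk [cs.getD 1 ' '])).getD 0
    let d3 := (PySem.Int.ofStr? (String.mk [cs.getD 2 ' '])).getD 0
    -- a0, a1, a2 = sorted((d1, d2, d3))
    let s := PySem.List.sorted [d1, d2, d3] (fun x => x)
    let a0 := s.getD 0 0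
    let a1 := s.getD 1 0
    let a2 := s.getD 2 0
    let maxVal := 10 * a2 + a1
    let minVal := if a0 > 0 then 10 * a0 + a1 else if a1 > 0 then 10 * a1 else 10 * a2
    maxVal - minVal
  else 0  -- ValueError / unpack error in Python: excluded by Pre_f

-- ===== PRECONDITION & SPEC =====
-- Pre_f: exactly the n for which str(n) is three digit characters; elsewhere both A and B raise ValueError
def Pre_f (n : Int) : Prop := 100 ≤ n ∧ n ≤ 999
instance (n : Int) : Decidable (Pre_f n) := by unfold Pre_f; infer_instance
def pvWitness_f : Int := 583
def Spec_f (n : Int) (out : Int) : Prop := out = f_alt n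
instance (n : Int) (out : Int) : Decidable (Spec_f n out) := by unfold Spec_f; infer_instance

-- ===== CLAIM (what is proved, stated in full; the proofs are below) =====
def Claim_equal_f : Prop := ∀ (n : Int), Dom_f n → Pre_f n → Spec_f n (f n)

-- ===== LEMMAS AND PROOFS =====
set_option maxHeartbeats 4000000 in
set_option maxRecDepth 10000 in
lemma f_eq_on_range : ∀ m ∈ List.range 900, f (100 + (m : Int)) = f_alt (100 + (m : Int)) := by decide

-- ===== VERDICT (by name: the statement is the Claim_ definition above) =====
theorem f_spec : Claim_equal_f := by
  intro n _ hpre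
  unfold Pre_f at hpre
  have h : n = 100 + ((n - 100).toNat : Int) := by omega
  have hm : (n - 100).toNat ∈ List.range 900 := by
    simp [List.mem_range]; omega
  unfold Spec_f
  rw [h]
  exact f_eq_on_range _ hm
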